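-- pv_equiv track=rewrite | github.com/Maria-hub-Westrin/nimbus-c2 | scripts/repo_hygiene.py | _strip_jammed_headers
-- ===== SOURCE A (Python) =====
-- from typing import Iterable, List, Optional, Sequence, Tuple
--
-- def _strip_jammed_headers(lines: List[str], style: Tuple) -> Tuple[List[str], bool]:
--     """Collapse repeated '# Copyright (c) Maria Westrin ...' fragments at top.
--
--     The pattern in the current repo is: several '# Copyright' markers
--     concatenated onto a single physical line, followed by a bunch of
--     restated licence clauses. This function strips any leading
--     block of such lines (anywhere near the top of the file, before real
--     content) and leaves the first real content line intact.
--
--     Returns (new_lines, was_modified).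
--     """
--     if not lines:
--         return lines, False
--
--     prefix, suffix, block_prefix, block_suffix = style
--
--     def looks_jammed(line: str) -> bool:
--         stripped = line.strip()
--         if stripped.count("Copyright (c) 2026 Maria Westrin") >= 2:
--             return True
--         if stripped.count("Licensed under the MIT License") >= 2:
--             return True
--         if stripped.count("derivative work must clearly credit") >= 1:
--             return True
--         return False
--
--     changed = False
--     out: List[str] = []
--     consumed_header = False
--     for idx, line in enumerate(lines):
--         if not consumed_header and idx < 5 and looks_jammed(line):
--             changed = True
--             # drop this line entirely
--             continue
--         consumed_header = True
--         out.append(line)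
--     return out, changed
-- ===== SOURCE B (Python) =====
-- from typing import List, Tuple
--
-- def _strip_jammed_headers(lines: List[str], style: Tuple) -> Tuple[List[str], bool]:
--     """Compute the length k of the leading run of jammed lines (bounded by the
--     first 5 lines) and return (lines[k:], k > 0)."""
--
--     def looks_jammed(line: str) -> bool:
--         stripped = line.strip()
--         if stripped.count("Copyright (c) 2026 Maria Westrin") >= 2:
--             return True
--         if stripped.count("Licensed under the MIT License") >= 2:
--             return True
--         if stripped.count("derivative work must clearly credit") >= 1:
--             return True
--         return False
--
--     k = 0
--     for idx, line in enumerate(lines):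
--         if idx < 5 and looks_jammed(line):
--             k += 1
--         else:
--             break
--     return lines[k:], k > 0
-- ===== Notes on version B (the rewrite author's own statement) =====
-- stated objective: simpler
-- what changed: Instead of rebuilding the whole list with an accumulating loop carrying changed/consumed_header flags, B just counts the leading run of jammed lines (bounded to the first 5) and returns (lines[k:], k > 0).
import Mathlib
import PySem

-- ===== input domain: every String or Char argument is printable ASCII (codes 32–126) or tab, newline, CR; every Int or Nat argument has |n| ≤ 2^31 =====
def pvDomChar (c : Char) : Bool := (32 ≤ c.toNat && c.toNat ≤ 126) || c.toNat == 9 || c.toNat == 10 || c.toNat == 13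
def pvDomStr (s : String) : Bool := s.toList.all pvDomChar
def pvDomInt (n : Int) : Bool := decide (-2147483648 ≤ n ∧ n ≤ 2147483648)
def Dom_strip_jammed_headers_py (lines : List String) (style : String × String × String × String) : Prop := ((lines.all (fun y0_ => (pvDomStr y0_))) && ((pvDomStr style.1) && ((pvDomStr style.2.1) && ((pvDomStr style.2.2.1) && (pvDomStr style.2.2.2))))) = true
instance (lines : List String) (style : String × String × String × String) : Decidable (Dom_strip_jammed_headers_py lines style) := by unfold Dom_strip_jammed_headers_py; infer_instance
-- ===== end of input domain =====

-- B rewrites A's accumulating loop (changed/consumed_header flags + rebuilt list) as a simple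
-- count of the leading jammed run followed by a slice: simpler decomposition, same O(n) cost.
-- The looks_jammed helper is kept unchanged and shared by both ports.

-- ===== PORT A =====
-- shared helper: Python's local 'looks_jammed'
def pvLooksJammed (line : String) : Bool :=
  let stripped := PySem.Str.strip line
  if PySem.Str.count stripped "Copyright (c) 2026 Maria Westrin" ≥ 2 then true
  else if PySem.Str.count stripped "Licensed under the MIT License" ≥ 2 then true
  else if PySem.Str.count stripped "derivative work must clearly credit" ≥ 1 then true
  else false

-- A's for-loop over enumerate(lines) with state (consumed_header, changed, out)
def pvALoop : List String → Nat → Bool → Bool → List String → List String × Bool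
  | [], _, _, changed, out => (out, changed)
  | l :: rest, idx, consumed, changed, out =>
    if !consumed && decide (idx < 5) && pvLooksJammed l then
      pvALoop rest (idx + 1) consumed true out
    else
      pvALoop rest (idx + 1) true changed (out ++ [l])

def strip_jammed_headers_py (lines : List String) (style : String × String × String × String) : List String × Bool :=
  if lines = [] then (lines, false)
  else
    -- prefix, suffix, block_prefix, block_suffix = style  (unpacked, unused)
    let _ := style
    pvALoop lines 0 false false []

-- ===== PORT B =====
-- B's counting loop: length of the leading jammed run, bounded by idx < 5
def pvJamCount : List String → Nat → Nat
  | [], _ => 0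
  | l :: rest, idx =>
    if decide (idx < 5) && pvLooksJammed l then pvJamCount rest (idx + 1) + 1 else 0

def strip_jammed_headers_py_alt (lines : List String) (style : String × String × String × String) : List String × Bool :=
  let _ := style
  let k := pvJamCount lines 0
  (lines.drop k, decide (k > 0))  -- lines[k:] with k : Nat is exactly List.drop k

-- ===== PRECONDITION & SPEC =====
def Spec_strip_jammed_headers_py (lines : List String) (style : String × String × String × String) (out : List String × Bool) : Prop := out = strip_jammed_headers_py_alt lines style
instance (lines : List String) (style : String × String × String × String) (out : List String × Bool) : Decidable (Spec_strip_jammed_headers_py lines style out) := by unfold Spec_strip_jammed_headers_py; infer_instance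

-- ===== CLAIM (what is proved, stated in full; the proofs are below) =====
def Claim_equal_strip_jammed_headers_py : Prop := ∀ (lines : List String) (style : String × String × String × String), Dom_strip_jammed_headers_py lines style → Spec_strip_jammed_headers_py lines style (strip_jammed_headers_py lines style)

-- ===== LEMMAS AND PROOFS =====

-- once consumed_header is true A's loop just appends the rest
theorem pvALoop_consumed (rest : List String) (idx : Nat) (changed : Bool) (out : List String) :
    pvALoop rest idx true changed out = (out ++ rest, changed) := by
  induction rest generalizing idx out with
  | nil => simp [pvALoop]
  | cons l rs ih => simp [pvALoop, ih]

-- A's loop, while not consumed, equals B's count-and-drop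
theorem pvALoop_eq_count (lines : List String) (idx : Nat) (changed : Bool) (out : List String) :
    pvALoop lines idx false changed out =
      (out ++ lines.drop (pvJamCount lines idx), changed || decide (pvJamCount lines idx > 0)) := by
  induction lines generalizing idx changed out with
  | nil => simp [pvALoop, pvJamCount]
  | cons l rs ih =>
    by_cases h : (decide (idx < 5) && pvLooksJammed l) = true
    · simp [pvALoop, pvJamCount, h, ih]
    · simp [pvALoop, pvJamCount, h, pvALoop_consumed]

-- ===== VERDICT (by name: the statement is the Claim_ definition above) =====
theorem strip_jammed_headers_py_spec : Claim_equal_strip_jammed_headers_py := by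
  intro lines style _
  unfold Spec_strip_jammed_headers_py strip_jammed_headers_py strip_jammed_headers_py_alt
  by_cases h : lines = []
  · subst h; simp [pvJamCount]
  · simp [h, pvALoop_eq_count]
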